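-- pv_equiv track=rewrite | github.com/MrBrantCode/unitest_baseline | mut_generate/mist_train_taco/taco_893/solution.py | calculate_eventual_length
-- ===== SOURCE A (Python) =====
-- def calculate_eventual_length(X: str) -> int:
--     s = 0
--     t = 0
--     for char in X:
--         if char == 'S':
--             s += 1
--         elif s > 0:
--             s -= 1
--         else:
--             t += 1
--     return s + t
-- ===== SOURCE B (Python) =====
-- def calculate_eventual_length(X: str) -> int:
--     # One pass: running sum c (+1 for 'S', -1 otherwise) and its minimum prefix value m;
--     # -m is the number of unmatched T's, c - m the leftover S's, so the answer is c - 2*m.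
--     c = 0
--     m = 0
--     for char in X:
--         c += 1 if char == 'S' else -1
--         if c < m:
--             m = c
--     return c - 2 * m
-- ===== Notes on version B (the rewrite author's own statement) =====
-- stated objective: alternative
-- what changed: Replaces A's two-counter cancellation bookkeeping (leftover S count plus unmatched T count with a conditional decrement) by a prefix-sum formulation: one running sum c and its prefix minimum m, returning the closed form c - 2*m.
import Mathlib
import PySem

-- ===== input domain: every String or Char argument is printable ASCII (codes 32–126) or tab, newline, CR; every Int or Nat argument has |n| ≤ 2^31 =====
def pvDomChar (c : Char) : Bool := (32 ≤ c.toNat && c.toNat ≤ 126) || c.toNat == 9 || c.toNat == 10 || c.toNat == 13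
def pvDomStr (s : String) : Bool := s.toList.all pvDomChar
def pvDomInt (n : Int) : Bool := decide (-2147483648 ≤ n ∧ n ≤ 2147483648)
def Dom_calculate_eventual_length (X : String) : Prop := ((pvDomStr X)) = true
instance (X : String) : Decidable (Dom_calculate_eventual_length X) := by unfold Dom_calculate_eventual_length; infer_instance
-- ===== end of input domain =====

-- B replaces A's two-counter cancellation with a running sum and its prefix minimum, returning c - 2*m (alternative decomposition, same cost).

-- ===== PORT A =====
-- state (s, t): leftover S count, unmatched T count
def calculate_eventual_length (X : String) : Int :=
  let st := X.toList.foldl (fun (st : Int × Int) char =>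
    if char = 'S' then (st.1 + 1, st.2)
    else if st.1 > 0 then (st.1 - 1, st.2)
    else (st.1, st.2 + 1)) (0, 0)
  st.1 + st.2

-- ===== PORT B =====
-- state (c, m): running sum and its prefix minimum
def calculate_eventual_length_alt (X : String) : Int :=
  let cm := X.toList.foldl (fun (cm : Int × Int) char =>
    let c := cm.1 + (if char = 'S' then 1 else -1)
    (c, if c < cm.2 then c else cm.2)) (0, 0)
  cm.1 - 2 * cm.2

-- ===== PRECONDITION & SPEC =====
def Spec_calculate_eventual_length (X : String) (out : Int) : Prop := out = calculate_eventual_length_alt X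
instance (X : String) (out : Int) : Decidable (Spec_calculate_eventual_length X out) := by unfold Spec_calculate_eventual_length; infer_instance

-- ===== CLAIM (what is proved, stated in full; the proofs are below) =====
def Claim_equal_calculate_eventual_length : Prop := ∀ (X : String), Dom_calculate_eventual_length X → Spec_calculate_eventual_length X (calculate_eventual_length X)

-- ===== LEMMAS AND PROOFS =====

-- Invariant: A's state (s,t) and B's state (c,m) stay related by s = c - m, t = -m (with m ≤ c).
theorem pv_fold_invariant (l : List Char) (c m : Int) (hm : m ≤ c) :
    l.foldl (fun (st : Int × Int) char =>
      if char = 'S' then (st.1 + 1, st.2)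
      else if st.1 > 0 then (st.1 - 1, st.2)
      else (st.1, st.2 + 1)) (c - m, -m)
    = (fun cm : Int × Int => (cm.1 - cm.2, -cm.2))
      (l.foldl (fun (cm : Int × Int) char =>
        let c := cm.1 + (if char = 'S' then 1 else -1)
        (c, if c < cm.2 then c else cm.2)) (c, m)) := by
  induction l generalizing c m with
  | nil => simp
  | cons ch tl ih =>
    simp only [List.foldl_cons]
    by_cases hS : ch = 'S'
    · simp only [hS, if_true]
      have h1 : c - m + 1 = c + 1 - m := by ring
      have h2 : ¬ (c + 1 < m) := by omega
      rw [h1, ih (c + 1) m (by omega)]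
      simp [h2]
    · simp only [if_neg hS]
      by_cases hpos : c - m > 0
      · have h2 : ¬ (c + -1 < m) := by omega
        simp only [if_pos hpos]
        have h1 : c - m - 1 = c + -1 - m := by ring
        rw [h1, ih (c + -1) m (by omega)]
        simp [h2]
      · have hcm : c = m := by omega
        have h2 : c + -1 < m := by omega
        simp only [if_neg hpos]
        have h1 : c - m = c + -1 - (c + -1) := by omega
        have h1' : -m + 1 = -(c + -1) := by omega
        rw [h1, h1', ih (c + -1) (c + -1) (by omega)]
        simp [h2]

-- ===== VERDICT (by name: the statement is the Claim_ definition above) =====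
theorem calculate_eventual_length_spec : Claim_equal_calculate_eventual_length := by
  intro X _
  unfold Spec_calculate_eventual_length calculate_eventual_length calculate_eventual_length_alt
  have h := pv_fold_invariant X.toList 0 0 le_rfl
  simp only [sub_zero, neg_zero] at h
  rw [h]
  set r := X.toList.foldl (fun (cm : Int × Int) char =>
    let c := cm.1 + (if char = 'S' then 1 else -1)
    (c, if c < cm.2 then c else cm.2)) (0, 0)
  simp
  ring
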